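-- pv_equiv track=rewrite | github.com/Tyferse/Python_public | ProjecEuler2021/Tasks 91-100/Task99.py | compare_powers
-- ===== SOURCE A (Python) =====
-- def compare_powers(pairx, pairy):
--     """
--     Сначала пытаемся выполнить быстрые вычисления с низкой точностью,
--     повторяя попытку с возрастающей точностью.
--     """
--     # First try fast low-precision computations,
--     # retrying with increasing precision
--     precision = 16
--     while precision <= 1024:
--         # Use interval arithmetic for approximate comparisons
--         xlow = BigFloat(pairx[0]).power(pairx[1], precision, False)
--         xhigh = BigFloat(pairx[0]).power(pairx[1], precision, True)
--         ylow = BigFloat(pairy[0]).power(pairy[1], precision, False)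
--         yhigh = BigFloat(pairy[0]).power(pairy[1], precision, True)
--         if xhigh.compare_to(ylow) < 0:
--             return -1
--         elif xlow.compare_to(yhigh) > 0:
--             return +1
--         else:
--             precision *= 2
--
--     # Otherwise do full-precision comparison (slow)
--     x = pairx[0] ** pairx[1]
--     y = pairy[0] ** pairy[1]
--     if x < y:
--         return -1
--     elif x > y:
--         return +1
--     else:
--         return 0
--
-- class BigFloat:
--     """
--     Представляет строго положительные числа,
--     равные mantissa * 2^exponent
--     """
--     def __init__(self, man, exp=0):
--         self.mantissa = man
--         self.exponent = exp
--
--     # The output's mantissa will have 'precision' or fewer bits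
--     def multiply(self, other, precision, roundup):
--         """
--         Мантисса на выходе будет иметь точность 'precision'
--         или меньшее количесвто битов.
--         """
--         man = self.mantissa * other.mantissa
--         exp = self.exponent + other.exponent
--         excess = man.bit_length() - precision
--         if excess > 0:
--             if roundup:
--                 mask = (1 << excess) - 1
--                 if mask & man != 0:
--                     man += 1 << excess
--
--                 excess = man.bit_length() - precision
--                 # In case 'man' is bumped up to the next power of 2
--
--             man >>= excess
--             exp += excess
--
--         return BigFloat(man, exp)
--
--     # Exponentiation by squaring
--     def power(self, y, precision, roundup):
--         if y < 0 or precision <= 0: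
--             raise ValueError()
--
--         x = self
--         z = BigFloat(1, 0)
--         while y != 0:
--             if y & 1 != 0:
--                 z = z.multiply(x, precision, roundup)
--
--             x = x.multiply(x, precision, roundup)
--             y >>= 1
--
--         return z
--
--     def compare_to(self, other):
--         min_exp = min(self.exponent, other.exponent)
--         tempx = self.mantissa << (self.exponent - min_exp)
--         tempy = other.mantissa << (other.exponent - min_exp)
--         if tempx < tempy:
--             return -1
--         elif tempx > tempy:
--             return +1
--         else:
--             return 0
-- ===== SOURCE B (Python) =====
-- def compare_powers(pairx, pairy):
--     """
--     Exact comparison of pairx[0]**pairx[1] with pairy[0]**pairy[1]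
--     using integer arithmetic only; exponents must be nonnegative.
--     """
--     a, b = pairx
--     c, d = pairy
--     if b < 0 or d < 0:
--         raise ValueError()
--     sx = _sign(a, b)
--     sy = _sign(c, d)
--     if sx != sy:
--         return (sx > sy) - (sx < sy)
--     if sx == 0:
--         return 0
--     return sx * _cmp_abs(abs(a), b, abs(c), d)
--
--
-- def _sign(base, exp):
--     # sign of base**exp for exp >= 0
--     if exp == 0:
--         return 1
--     if base == 0:
--         return 0
--     if base > 0 or exp % 2 == 0:
--         return 1
--     return -1
--
--
-- def _iroot(n, s):
--     # largest r >= 1 with r**s <= n  (n >= 1, s >= 1), by binary search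
--     lo, hi = 1, n
--     while lo < hi:
--         mid = (lo + hi + 1) // 2
--         if mid ** s <= n:
--             lo = mid
--         else:
--             hi = mid - 1
--     return lo
--
--
-- def _reduce(n, e):
--     # rewrite n**e (n >= 2) as w**(s*e) with the base w as small as possible
--     for s in range(n.bit_length() - 1, 1, -1):
--         w = _iroot(n, s)
--         if w ** s == n:
--             return w, s * e
--     return n, e
--
--
-- def _cmp_abs(u, b, v, d):
--     # compare u**b with v**d for u, v >= 1 and b, d >= 0
--     if (u == 1 or b == 0) and (v == 1 or d == 0):
--         return 0
--     if u == 1 or b == 0: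
--         return -1
--     if v == 1 or d == 0:
--         return 1
--     u, b = _reduce(u, b)
--     v, d = _reduce(v, d)
--     if u == v:
--         return (b > d) - (b < d)
--     # u**b != v**d now; separate their base-2 logarithms with doubling
--     # precision, using  k*log2(w) in [bit_length(w**k) - 1, bit_length(w**k))
--     k = 1
--     while k * (u.bit_length() + v.bit_length()) <= 10 ** 6:
--         lu = (u ** k).bit_length()
--         lv = (v ** k).bit_length()
--         if (lu - 1) * b >= lv * d:
--             return 1
--         if (lv - 1) * d >= lu * b:
--             return -1
--         k *= 2
--     # near-tie between astronomically close powers: compare them outright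
--     x, y = u ** b, v ** d
--     return (x > y) - (x < y)
-- ===== Notes on version B (the rewrite author's own statement) =====
-- stated objective: alternative
-- what changed: B drops the BigFloat interval-arithmetic class and its increasing-precision refinement loop and compares the powers exactly with integer arithmetic: sign analysis, perfect-power reduction of the bases, and bit-length log2 separation on moderate scratch powers; Pre_ excludes negative exponents (A raises ValueError) and inputs whose two compared powers are both negative, where A feeds its strictly-positive BigFloat class negative mantissas, its rounding directions invert and the returned sign is accidental (wrong e.g. on equal powers).
-- outside the precondition, e.g. on compare_powers((-243, 3), (-27, 5)): A returns 1, B returns 0; on compare_powers((2, -1), (3, 4)): A raises ValueError, B raises ValueError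
import Mathlib
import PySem

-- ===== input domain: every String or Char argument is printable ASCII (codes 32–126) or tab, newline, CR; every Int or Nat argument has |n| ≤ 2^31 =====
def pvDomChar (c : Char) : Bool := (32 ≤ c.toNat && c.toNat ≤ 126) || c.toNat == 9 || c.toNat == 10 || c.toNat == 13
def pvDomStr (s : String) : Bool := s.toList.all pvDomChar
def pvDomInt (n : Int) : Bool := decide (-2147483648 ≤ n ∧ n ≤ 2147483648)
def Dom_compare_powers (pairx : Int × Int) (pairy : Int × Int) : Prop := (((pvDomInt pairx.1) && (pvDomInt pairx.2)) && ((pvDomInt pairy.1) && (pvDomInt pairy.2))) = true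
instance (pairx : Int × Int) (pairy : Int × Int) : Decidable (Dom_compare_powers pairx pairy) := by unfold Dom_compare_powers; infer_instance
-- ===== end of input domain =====

-- B replaces A's BigFloat interval-arithmetic refinement loop by exact integer arithmetic
-- (sign analysis, perfect-power reduction, bit-length log2 separation); objective: alternative.

-- ===== PORT A =====
-- A BigFloat is its (mantissa, exponent) pair.  In BigFloat.multiply, Python's shifts
-- `man >>= excess` / `1 << excess` have nonnegative counts on every reachable state
-- (excess > 0 in that branch, and the recomputed excess stays ≥ 0 for precision ≥ 2,
-- proved in pvRoundUpCore below), so `.toNat` is exact there.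
def pvBFmul (a b : Int × Int) (precision : Int) (roundup : Bool) : Int × Int :=
  let man := a.1 * b.1
  let exp := a.2 + b.2
  let excess : Int := (PySem.Int.bitLength man : Int) - precision
  if 0 < excess then
    if roundup then
      let mask := (1 <<< excess.toNat) - 1
      if PySem.Int.band mask man ≠ 0 then
        let man2 := man + (1 <<< excess.toNat)
        let excess2 : Int := (PySem.Int.bitLength man2 : Int) - precision
        (man2 >>> excess2.toNat, exp + excess2)
      else (man >>> excess.toNat, exp + excess)
    else (man >>> excess.toNat, exp + excess)
  else (man, exp)

def pvBFpowLoop (precision : Int) (roundup : Bool) (x z : Int × Int) (y : Nat) : Int × Int :=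
  if y = 0 then z
  else
    let z' := if y % 2 = 1 then pvBFmul z x precision roundup else z
    pvBFpowLoop precision roundup (pvBFmul x x precision roundup) z' (y / 2)
termination_by y
decreasing_by omega

def pvBFpow (man y precision : Int) (roundup : Bool) : Int × Int :=
  pvBFpowLoop precision roundup (man, 0) (1, 0) y.toNat

def pvBFcmp (a b : Int × Int) : Int :=
  let minExp := min a.2 b.2
  let tempx := a.1 <<< (a.2 - minExp).toNat
  let tempy := b.1 <<< (b.2 - minExp).toNat
  if tempx < tempy then -1 else if tempy < tempx then 1 else 0

def pvCPloop (pairx pairy : Int × Int) (precision : Int) : Int :=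
  if 1 ≤ precision ∧ precision ≤ 1024 then
    let xlow := pvBFpow pairx.1 pairx.2 precision false
    let xhigh := pvBFpow pairx.1 pairx.2 precision true
    let ylow := pvBFpow pairy.1 pairy.2 precision false
    let yhigh := pvBFpow pairy.1 pairy.2 precision true
    if pvBFcmp xhigh ylow < 0 then -1
    else if 0 < pvBFcmp xlow yhigh then 1
    else pvCPloop pairx pairy (precision * 2)
  else
    let x := pairx.1 ^ pairx.2.toNat
    let y := pairy.1 ^ pairy.2.toNat
    if x < y then -1 else if x > y then 1 else 0
termination_by (1025 - precision).toNat
decreasing_by omega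

def compare_powers (pairx : Int × Int) (pairy : Int × Int) : Int := pvCPloop pairx pairy 16

-- ===== PORT B =====
-- Source B _sign: sign of base**exp for exp >= 0
def pvSign (base e : Int) : Int :=
  if e = 0 then 1
  else if base = 0 then 0
  else if 0 < base ∨ e % 2 = 0 then 1
  else -1

-- Source B _iroot's binary-search loop (all quantities positive, so / is Python's //)
def pvIrootLoop (a e lo hi : Int) : Int :=
  if lo < hi then
    let mid := (lo + hi + 1) / 2
    if mid ^ e.toNat ≤ a then pvIrootLoop a e mid hi
    else pvIrootLoop a e lo (mid - 1)
  else lo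
termination_by (hi - lo).toNat
decreasing_by all_goals omega

def pvIroot (n s : Int) : Int := pvIrootLoop n s 1 n

-- Source B _reduce: for s in range(n.bit_length() - 1, 1, -1)
def pvReduceLoop (n e : Int) (s : Nat) : Int × Int :=
  if s < 2 then (n, e)
  else
    let w := pvIroot n (s : Int)
    if w ^ s = n then (w, (s : Int) * e)
    else pvReduceLoop n e (s - 1)
termination_by s
decreasing_by omega

def pvReduce (n e : Int) : Int × Int := pvReduceLoop n e (PySem.Int.bitLength n - 1)

-- Source B's doubling-precision while loop.  The fuel only makes the recursion total:
-- at the call site k starts at 1 and doubles while k * (bit lengths ≥ 4) ≤ 10^6,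
-- so at most 18 iterations occur and the fuel of 21 is never exhausted; its
-- exhaustion branch is the same exact comparison the cap branch produces.
def pvLogLoop (u v b d : Int) (fuel k : Nat) : Int :=
  match fuel with
  | 0 =>
    (if u ^ b.toNat > v ^ d.toNat then 1 else 0) - (if u ^ b.toNat < v ^ d.toNat then 1 else 0)
  | fuel + 1 =>
    if k * (PySem.Int.bitLength u + PySem.Int.bitLength v) ≤ 10 ^ 6 then
      let lu : Int := (PySem.Int.bitLength (u ^ k) : Int)
      let lv : Int := (PySem.Int.bitLength (v ^ k) : Int)
      if (lu - 1) * b ≥ lv * d then 1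
      else if (lv - 1) * d ≥ lu * b then -1
      else pvLogLoop u v b d fuel (k * 2)
    else
      (if u ^ b.toNat > v ^ d.toNat then 1 else 0) - (if u ^ b.toNat < v ^ d.toNat then 1 else 0)

-- Source B _cmp_abs
def pvCmpAbs (u b v d : Int) : Int :=
  if (u = 1 ∨ b = 0) ∧ (v = 1 ∨ d = 0) then 0
  else if u = 1 ∨ b = 0 then -1
  else if v = 1 ∨ d = 0 then 1
  else
    let ub := pvReduce u b
    let vd := pvReduce v d
    if ub.1 = vd.1 then (if ub.2 > vd.2 then 1 else 0) - (if ub.2 < vd.2 then 1 else 0)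
    else pvLogLoop ub.1 vd.1 ub.2 vd.2 21 1

def compare_powers_alt (pairx : Int × Int) (pairy : Int × Int) : Int :=
  if pairx.2 < 0 ∨ pairy.2 < 0 then 0  -- Source B raises ValueError here (outside Pre_)
  else
    let sx := pvSign pairx.1 pairx.2
    let sy := pvSign pairy.1 pairy.2
    if sx ≠ sy then (if sx > sy then 1 else 0) - (if sx < sy then 1 else 0)
    else if sx = 0 then 0
    else sx * pvCmpAbs |pairx.1| pairx.2 |pairy.1| pairy.2

-- ===== PRECONDITION & SPEC =====
-- Pre_ excludes (i) negative exponents, on which A raises ValueError (BigFloat.power) — B raises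
-- ValueError there too — and (ii) inputs whose two compared powers are BOTH negative (both bases
-- negative with odd exponents): those feed A's BigFloat class outside its documented
-- 'strictly positive' domain, where its two rounding directions are inverted, so A's early
-- interval comparison can return a wrong sign (e.g. A returns 1 for (-243)^3 vs (-27)^5 although
-- the two powers are equal); B returns the exact comparison there.
def Pre_compare_powers (pairx : Int × Int) (pairy : Int × Int) : Prop :=
  0 ≤ pairx.2 ∧ 0 ≤ pairy.2 ∧
    ¬(pairx.1 < 0 ∧ pairy.1 < 0 ∧ pairx.2 % 2 = 1 ∧ pairy.2 % 2 = 1)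
instance (pairx : Int × Int) (pairy : Int × Int) : Decidable (Pre_compare_powers pairx pairy) := by unfold Pre_compare_powers; infer_instance

def pvWitness_compare_powers : (Int × Int) × (Int × Int) := ((3, 4), (-2, 5))

def Spec_compare_powers (pairx : Int × Int) (pairy : Int × Int) (out : Int) : Prop := out = compare_powers_alt pairx pairy
instance (pairx : Int × Int) (pairy : Int × Int) (out : Int) : Decidable (Spec_compare_powers pairx pairy out) := by unfold Spec_compare_powers; infer_instance

-- ===== CLAIM (what is proved, stated in full; the proofs are below) =====
def Claim_equal_compare_powers : Prop := ∀ (pairx : Int × Int) (pairy : Int × Int), Dom_compare_powers pairx pairy → Pre_compare_powers pairx pairy → Spec_compare_powers pairx pairy (compare_powers pairx pairy)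

-- ===== LEMMAS AND PROOFS =====

-- the exact integer value a BigFloat denotes (exponents stay ≥ 0 throughout A's run)
def bfVal (a : Int × Int) : Int := a.1 * 2 ^ a.2.toNat

-- the exact comparison both programs compute: sign of pairx^ - pairy^
def pvExactCmp (pairx pairy : Int × Int) : Int :=
  (if pairx.1 ^ pairx.2.toNat > pairy.1 ^ pairy.2.toNat then 1 else 0) -
    (if pairx.1 ^ pairx.2.toNat < pairy.1 ^ pairy.2.toNat then 1 else 0)

theorem pvFloor_le (m : Int) (k : Nat) : m / 2 ^ k * 2 ^ k ≤ m :=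
  Int.ediv_mul_le m (by positivity)

theorem pvFloor_gt (m : Int) (k : Nat) : m - 2 ^ k + 1 ≤ m / 2 ^ k * 2 ^ k := by
  have h := Int.lt_ediv_add_one_mul_self m (b := 2 ^ k) (by positivity)
  nlinarith [h]

theorem pvBL_mono (m n : Int) (hm : m ≠ 0) (h : m.natAbs ≤ n.natAbs) :
    PySem.Int.bitLength m ≤ PySem.Int.bitLength n := by
  by_contra hc
  rw [Nat.not_le] at hc
  have h1 := PySem.Int.two_pow_bitLength_le m hm
  have h2 := PySem.Int.lt_two_pow_bitLength n
  have h3 : 2 ^ PySem.Int.bitLength n ≤ 2 ^ (PySem.Int.bitLength m - 1) :=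
    Nat.pow_le_pow_right (by norm_num) (by omega)
  omega

theorem pvAbsBounds (man : Int) (hm : man ≠ 0) :
    (2:Int) ^ (PySem.Int.bitLength man - 1) ≤ |man| ∧ |man| < 2 ^ PySem.Int.bitLength man := by
  have h1 := PySem.Int.two_pow_bitLength_le man hm
  have h2 := PySem.Int.lt_two_pow_bitLength man
  constructor
  · calc (2:Int) ^ (PySem.Int.bitLength man - 1) = ((2 ^ (PySem.Int.bitLength man - 1) : Nat) : Int) := by push_cast; ring
      _ ≤ (man.natAbs : Int) := by exact_mod_cast h1
      _ = |man| := (Int.abs_eq_natAbs man).symm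
  · calc |man| = (man.natAbs : Int) := Int.abs_eq_natAbs man
      _ < ((2 ^ PySem.Int.bitLength man : Nat) : Int) := by exact_mod_cast h2
      _ = 2 ^ PySem.Int.bitLength man := by push_cast; ring

theorem pvRoundUpCore (man p : Int) (hp : 2 ≤ p)
    (hbl : p < (PySem.Int.bitLength man : Int))
    (hnd : ¬ ((2:Int) ^ (((PySem.Int.bitLength man : Int) - p).toNat) ∣ man)) :
    0 ≤ (PySem.Int.bitLength (man + 2 ^ (((PySem.Int.bitLength man : Int) - p).toNat)) : Int) - p ∧
    man < (man + 2 ^ (((PySem.Int.bitLength man : Int) - p).toNat)) /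
        2 ^ (((PySem.Int.bitLength (man + 2 ^ (((PySem.Int.bitLength man : Int) - p).toNat)) : Int) - p).toNat) *
        2 ^ (((PySem.Int.bitLength (man + 2 ^ (((PySem.Int.bitLength man : Int) - p).toNat)) : Int) - p).toNat) ∧
    (0 ≤ man → 0 ≤ (man + 2 ^ (((PySem.Int.bitLength man : Int) - p).toNat)) /
        2 ^ (((PySem.Int.bitLength (man + 2 ^ (((PySem.Int.bitLength man : Int) - p).toNat)) : Int) - p).toNat)) ∧
    (man < 0 → (man + 2 ^ (((PySem.Int.bitLength man : Int) - p).toNat)) /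
        2 ^ (((PySem.Int.bitLength (man + 2 ^ (((PySem.Int.bitLength man : Int) - p).toNat)) : Int) - p).toNat) < 0) := by
  set bl := PySem.Int.bitLength man with hbldef
  set E := (((bl : Int)) - p).toNat with hEdef
  have hEc : (E : Int) = (bl : Int) - p := by omega
  set man2 := man + 2 ^ E with hman2
  set bl2 := PySem.Int.bitLength man2 with hbl2def
  set E2 := (((bl2 : Int)) - p).toNat with hE2def
  have hmanne : man ≠ 0 := by rintro rfl; exact hnd (dvd_zero _)
  obtain ⟨hlo, hhi⟩ := pvAbsBounds man hmanne
  have hblge : 3 ≤ bl := by omega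
  -- power relations
  have hBD : (2:Int) ^ (bl - 1) = 2 * 2 ^ (bl - 2) := by
    rw [← pow_succ']; congr 1; omega
  have hCB : (2:Int) ^ bl = 2 * 2 ^ (bl - 1) := by
    rw [← pow_succ']; congr 1; omega
  have hAD : (2:Int) ^ E ≤ 2 ^ (bl - 2) :=
    pow_le_pow_right₀ (by norm_num) (by omega)
  have hApos : (0:Int) < 2 ^ E := by positivity
  rcases lt_trichotomy man 0 with hneg | hzero | hpos
  · -- negative mantissa: |man2| shrinks, bit length drops by at most one
    have habs : |man| = -man := abs_of_neg hneg
    have hman2neg : man2 < 0 := by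
      rw [hman2]; rw [habs] at hlo; nlinarith
    have hman2ne : man2 ≠ 0 := by omega
    obtain ⟨hlo2, hhi2⟩ := pvAbsBounds man2 hman2ne
    have habs2 : |man2| = -man2 := abs_of_neg hman2neg
    -- bl2 ≤ bl
    have hble : bl2 ≤ bl := by
      apply pvBL_mono man2 man hman2ne
      have : man2.natAbs ≤ man.natAbs := by
        rw [← Nat.cast_le (α := Int), ← Int.abs_eq_natAbs, ← Int.abs_eq_natAbs, habs, habs2]
        omega
      exact this
    -- bl2 ≥ bl - 1
    have hbge : bl - 1 ≤ bl2 := by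
      by_contra hc
      rw [Nat.not_le] at hc
      have h3 : (2:Int) ^ bl2 ≤ 2 ^ (bl - 2) :=
        pow_le_pow_right₀ (by norm_num) (by omega)
      rw [habs2] at hhi2
      rw [habs] at hlo
      nlinarith
    have hE2le : E2 ≤ E := by omega
    have hE2c : (E2 : Int) = (bl2 : Int) - p := by omega
    have hA2A : (2:Int) ^ E2 ≤ 2 ^ E := pow_le_pow_right₀ (by norm_num) hE2le
    refine ⟨by omega, ?_, by intro h; omega, ?_⟩
    · have := pvFloor_gt man2 E2
      nlinarith
    · intro _
      exact Int.ediv_neg_of_neg_of_pos hman2neg (by positivity)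
  · exact absurd hzero hmanne
  · -- positive mantissa
    have habs : |man| = man := abs_of_pos hpos
    have hman2pos : 0 < man2 := by rw [hman2]; positivity
    have hman2ne : man2 ≠ 0 := by omega
    obtain ⟨hlo2, hhi2⟩ := pvAbsBounds man2 hman2ne
    have habs2 : |man2| = man2 := abs_of_pos hman2pos
    have hble : bl ≤ bl2 := by
      apply pvBL_mono man man2 hmanne
      rw [← Nat.cast_le (α := Int), ← Int.abs_eq_natAbs, ← Int.abs_eq_natAbs, habs, habs2]
      omega
    have hbge : bl2 ≤ bl + 1 := by
      by_contra hc
      rw [Nat.not_le] at hc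
      have h3 : (2:Int) ^ (bl + 1) ≤ 2 ^ (bl2 - 1) :=
        pow_le_pow_right₀ (by norm_num) (by omega)
      rw [habs2] at hlo2
      rw [habs] at hhi
      have hCB1 : (2:Int) ^ (bl + 1) = 2 * 2 ^ bl := by rw [← pow_succ']
      nlinarith
    have hE2c : (E2 : Int) = (bl2 : Int) - p := by omega
    refine ⟨by omega, ?_, by intro h; exact Int.ediv_nonneg (by omega) (by positivity), by intro h; omega⟩
    rcases Nat.eq_or_lt_of_le hble with heq | hlt
    · -- bl2 = bl : excess unchanged, value goes up by at least one ulp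
      have hE2E : E2 = E := by omega
      rw [hE2E]
      have := pvFloor_gt man2 E
      omega
    · -- bl2 = bl + 1 : man2 ≥ 2^bl > man
      have hbl2eq : bl2 = bl + 1 := by omega
      have hE2E : E2 = E + 1 := by omega
      have hman2ge : (2:Int) ^ bl ≤ man2 := by
        have : (2:Int) ^ (bl2 - 1) ≤ man2 := by rw [habs2] at hlo2; exact hlo2
        rw [hbl2eq] at this; simpa using this
      have hdiv : (2:Int) ^ bl / 2 ^ E2 * 2 ^ E2 = 2 ^ bl := by
        rw [Int.ediv_mul_cancel]
        exact pow_dvd_pow 2 (by omega)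
      have hmono : (2:Int) ^ bl / 2 ^ E2 ≤ man2 / 2 ^ E2 :=
        Int.ediv_le_ediv (by positivity) hman2ge
      have hmanlt : man < 2 ^ bl := by rw [habs] at hhi; omega
      have h2E2 : (0:Int) ≤ 2 ^ E2 := by positivity
      nlinarith

theorem pvShiftRight_eq (m : Int) (k : Nat) : m >>> k = m / 2 ^ k := by
  rw [Int.shiftRight_eq_div_pow]; push_cast; ring_nf

theorem pvCastShift (k : Nat) : ((1 <<< k : Nat) : Int) = 2 ^ k := by
  rw [Nat.one_shiftLeft]; push_cast; ring

theorem pvDvdSuccIffMod (q P : Nat) (hq : 0 < q) : q ∣ (P + 1) ↔ P % q = q - 1 := by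
  rw [Nat.dvd_iff_mod_eq_zero]
  have h0 : P % q < q := Nat.mod_lt _ hq
  have h1 : (P + 1) % q = (P % q + 1) % q := by
    conv_lhs => rw [← Nat.div_add_mod P q, Nat.add_assoc, Nat.mul_add_mod]
  rcases Nat.lt_or_ge (P % q + 1) q with h | h
  · rw [h1, Nat.mod_eq_of_lt h]; omega
  · have h2 : P % q + 1 = q := by omega
    rw [h1, h2, Nat.mod_self]; omega

theorem pvBand_mask_zero_iff (k : Nat) (m : Int) :
    PySem.Int.band (((1 <<< k - 1 : Nat) : Int)) m = 0 ↔ ((2:Int) ^ k) ∣ m := by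
  have hsh : (1 <<< k : Nat) = 2 ^ k := Nat.one_shiftLeft k
  have hq : 0 < (2:Nat) ^ k := Nat.two_pow_pos k
  have hmask : (1 <<< k - 1 : Nat) = 2 ^ k - 1 := by omega
  rw [hmask]
  unfold PySem.Int.band
  rcases le_or_gt 0 m with hm | hm
  · rw [if_pos (by positivity), if_pos hm]
    have htn : ((2 ^ k - 1 : Nat) : Int).toNat = 2 ^ k - 1 := by omega
    rw [htn, Nat.and_comm, Nat.and_two_pow_sub_one_eq_mod]
    have hcast : ((2:Int) ^ k) ∣ m ↔ (2 ^ k : Nat) ∣ m.toNat := by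
      rw [← Int.natCast_dvd_natCast]
      push_cast
      rw [Int.toNat_of_nonneg hm]
    rw [hcast, Nat.dvd_iff_mod_eq_zero]
    have := Nat.mod_lt m.toNat hq
    omega
  · rw [if_pos (by positivity), if_neg (by omega)]
    set P := (-m - 1).toNat with hPdef
    have hPm : (P : Int) = -m - 1 := Int.toNat_of_nonneg (by omega)
    have htn : ((2 ^ k - 1 : Nat) : Int).toNat = 2 ^ k - 1 := by omega
    rw [htn, Nat.and_comm, Nat.and_two_pow_sub_one_eq_mod]
    have hmod : P % 2 ^ k < 2 ^ k := Nat.mod_lt _ hq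
    have hdvd : ((2:Int) ^ k) ∣ m ↔ (2 ^ k : Nat) ∣ (P + 1) := by
      have h1 : ((2:Int) ^ k) ∣ m ↔ ((2:Int) ^ k) ∣ ((P : Int) + 1) := by
        constructor
        · intro h
          have : ((P : Int) + 1) = -m := by omega
          rw [this]; exact dvd_neg.mpr h
        · intro h
          have : m = -((P : Int) + 1) := by omega
          rw [this]; exact dvd_neg.mpr h
      rw [h1, ← Int.natCast_dvd_natCast]
      push_cast
      rfl
    rw [hdvd, pvDvdSuccIffMod _ _ hq]
    omega

theorem pvMul_le (a b : Int × Int) (p : Int) (ha : 0 ≤ a.2) (hb : 0 ≤ b.2) :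
    bfVal (pvBFmul a b p false) ≤ bfVal a * bfVal b := by
  simp only [pvBFmul, Bool.false_eq_true, if_false]
  have hexp : ((a.2 + b.2).toNat) = a.2.toNat + b.2.toNat := by omega
  split_ifs with h1
  · set man := a.1 * b.1 with hman
    set E := ((PySem.Int.bitLength man : Int) - p).toNat with hE
    simp only [bfVal, pvShiftRight_eq]
    have h2 : ((a.2 + b.2 + ((PySem.Int.bitLength man : Int) - p)).toNat) = a.2.toNat + b.2.toNat + E := by omega
    rw [h2]
    have hfl := pvFloor_le man E
    have hpos : (0:Int) ≤ 2 ^ (a.2.toNat + b.2.toNat) := by positivity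
    calc man / 2 ^ E * 2 ^ (a.2.toNat + b.2.toNat + E)
        = (man / 2 ^ E * 2 ^ E) * 2 ^ (a.2.toNat + b.2.toNat) := by rw [pow_add]; ring
      _ ≤ man * 2 ^ (a.2.toNat + b.2.toNat) := by nlinarith
      _ = a.1 * 2 ^ a.2.toNat * (b.1 * 2 ^ b.2.toNat) := by rw [pow_add]; ring
  · simp only [bfVal]
    rw [hexp, pow_add]
    exact le_of_eq (by ring)

theorem pvMul_ge (a b : Int × Int) (p : Int) (hp : 2 ≤ p) (ha : 0 ≤ a.2) (hb : 0 ≤ b.2) :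
    bfVal a * bfVal b ≤ bfVal (pvBFmul a b p true) := by
  simp only [pvBFmul, reduceIte]
  set man := a.1 * b.1 with hman
  set E := ((PySem.Int.bitLength man : Int) - p).toNat with hE
  have hprod : a.1 * 2 ^ a.2.toNat * (b.1 * 2 ^ b.2.toNat) = man * 2 ^ (a.2.toNat + b.2.toNat) := by
    rw [pow_add, hman]; ring
  split_ifs with h1 h2
  · -- rounded up after bump
    have hbl : p < (PySem.Int.bitLength man : Int) := by omega
    have hnd : ¬ ((2:Int) ^ E ∣ man) := by
      rw [← pvBand_mask_zero_iff E man] at *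
      intro hc; exact h2 hc
    obtain ⟨hexc2, hgt, -, -⟩ := pvRoundUpCore man p hp hbl hnd
    rw [pvCastShift] at *
    set man2 := man + 2 ^ E with hman2
    set E2 := ((PySem.Int.bitLength man2 : Int) - p).toNat with hE2
    simp only [bfVal, pvShiftRight_eq]
    have hexpN : ((a.2 + b.2 + ((PySem.Int.bitLength man2 : Int) - p)).toNat) = a.2.toNat + b.2.toNat + E2 := by
      omega
    rw [hexpN, hprod]
    have hpow : (0:Int) ≤ 2 ^ (a.2.toNat + b.2.toNat) := by positivity
    calc man * 2 ^ (a.2.toNat + b.2.toNat)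
        ≤ (man2 / 2 ^ E2 * 2 ^ E2) * 2 ^ (a.2.toNat + b.2.toNat) := by nlinarith
      _ = man2 / 2 ^ E2 * 2 ^ (a.2.toNat + b.2.toNat + E2) := by rw [pow_add]; ring
  · -- mantissa divisible: shifting is exact
    have hdvd : (2:Int) ^ E ∣ man := by
      rw [← pvBand_mask_zero_iff E man]
      exact not_ne_iff.mp h2
    simp only [bfVal, pvShiftRight_eq]
    have hexpN : ((a.2 + b.2 + ((PySem.Int.bitLength man : Int) - p)).toNat) = a.2.toNat + b.2.toNat + E := by
      omega
    rw [hexpN, hprod]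
    refine le_of_eq ?_
    have hc : man / 2 ^ E * 2 ^ (a.2.toNat + b.2.toNat + E) = (man / 2 ^ E * 2 ^ E) * 2 ^ (a.2.toNat + b.2.toNat) := by
      rw [pow_add]; ring
    rw [hc, Int.ediv_mul_cancel hdvd, pow_add]
  · simp only [bfVal]
    have hexpN : ((a.2 + b.2).toNat) = a.2.toNat + b.2.toNat := by omega
    rw [hexpN, hprod]

theorem pvMul_man_nonneg (a b : Int × Int) (p : Int) (ru : Bool) (h : 0 ≤ a.1 * b.1) :
    0 ≤ (pvBFmul a b p ru).1 := by
  simp only [pvBFmul]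
  set man := a.1 * b.1 with hman
  split_ifs with h1 h2 h3 <;>
    simp only [pvShiftRight_eq] <;>
    first
      | exact h
      | exact Int.ediv_nonneg h (by positivity)
      | exact Int.ediv_nonneg (by rw [pvCastShift]; positivity) (by positivity)

theorem pvMul_man_pos (a b : Int × Int) (p : Int) (ru : Bool) (hp : 1 ≤ p) (h : 0 < a.1 * b.1) :
    0 < (pvBFmul a b p ru).1 := by
  simp only [pvBFmul]
  set man := a.1 * b.1 with hman
  have hmanne : man ≠ 0 := by omega
  obtain ⟨hlo, hhi⟩ := pvAbsBounds man hmanne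
  rw [abs_of_pos h] at hlo hhi
  have hdivpos : ∀ k : Nat, (k : Int) ≤ (PySem.Int.bitLength man : Int) - 1 → 0 < man / 2 ^ k := by
    intro k hk
    have h2 : (2:Int) ^ k ≤ 2 ^ (PySem.Int.bitLength man - 1) :=
      pow_le_pow_right₀ (by norm_num) (by omega)
    have h3 : (2:Int) ^ k ≤ man := le_trans h2 hlo
    have hp2 : (0:Int) < 2 ^ k := by positivity
    have := (Int.le_ediv_iff_mul_le hp2 (a := 1) (b := man)).mpr (by omega)
    omega
  split_ifs with h1 h2 h3
  · -- bumped branch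
    rw [pvCastShift]
    set E := ((PySem.Int.bitLength man : Int) - p).toNat with hE
    set man2 := man + 2 ^ E with hman2
    have hman2pos : 0 < man2 := by
      have h0 : (0:Int) < 2 ^ E := by positivity
      omega
    have hman2ne : man2 ≠ 0 := by omega
    obtain ⟨hlo2, hhi2⟩ := pvAbsBounds man2 hman2ne
    rw [abs_of_pos hman2pos] at hlo2 hhi2
    set exc2 : Int := (PySem.Int.bitLength man2 : Int) - p with hexc2
    simp only [pvShiftRight_eq]
    rcases le_or_gt exc2 0 with hc | hc
    · have : exc2.toNat = 0 := by omega
      rw [this]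
      simpa using hman2pos
    · have hE2 : (exc2.toNat : Int) ≤ (PySem.Int.bitLength man2 : Int) - 1 := by omega
      have h2 : (2:Int) ^ exc2.toNat ≤ 2 ^ (PySem.Int.bitLength man2 - 1) :=
        pow_le_pow_right₀ (by norm_num) (by omega)
      have h3 : (2:Int) ^ exc2.toNat ≤ man2 := le_trans h2 hlo2
      have hp2 : (0:Int) < 2 ^ exc2.toNat := by positivity
      have := (Int.le_ediv_iff_mul_le hp2 (a := 1) (b := man2)).mpr (by omega)
      omega
  · simp only [pvShiftRight_eq]; exact hdivpos _ (by omega)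
  · simp only [pvShiftRight_eq]; exact hdivpos _ (by omega)
  · exact h

theorem pvMul_man_neg (a b : Int × Int) (p : Int) (ru : Bool) (hp : 2 ≤ p) (h : a.1 * b.1 < 0) :
    (pvBFmul a b p ru).1 < 0 := by
  simp only [pvBFmul]
  set man := a.1 * b.1 with hman
  split_ifs with h1 h2 h3
  · -- bumped branch: sign is preserved (pvRoundUpCore)
    have hbl : p < (PySem.Int.bitLength man : Int) := by omega
    have hnd : ¬ ((2:Int) ^ (((PySem.Int.bitLength man : Int) - p).toNat) ∣ man) := by
      rw [← pvBand_mask_zero_iff (((PySem.Int.bitLength man : Int) - p).toNat) man] at *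
      intro hc; exact h3 hc
    obtain ⟨-, -, -, hneg⟩ := pvRoundUpCore man p hp hbl hnd
    rw [pvCastShift]
    simp only [pvShiftRight_eq]
    exact hneg h
  · simp only [pvShiftRight_eq]
    exact Int.ediv_neg_of_neg_of_pos h (by positivity)
  · simp only [pvShiftRight_eq]
    exact Int.ediv_neg_of_neg_of_pos h (by positivity)
  · exact h

theorem pvMul_exp (a b : Int × Int) (p : Int) (ru : Bool) (hp : 2 ≤ p)
    (ha : 0 ≤ a.2) (hb : 0 ≤ b.2) : 0 ≤ (pvBFmul a b p ru).2 := by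
  simp only [pvBFmul]
  set man := a.1 * b.1 with hman
  split_ifs with h1 h2 h3
  · have hbl : p < (PySem.Int.bitLength man : Int) := by omega
    have hnd : ¬ ((2:Int) ^ (((PySem.Int.bitLength man : Int) - p).toNat) ∣ man) := by
      rw [← pvBand_mask_zero_iff (((PySem.Int.bitLength man : Int) - p).toNat) man] at *
      intro hc; exact h3 hc
    obtain ⟨hexc2, -, -, -⟩ := pvRoundUpCore man p hp hbl hnd
    rw [pvCastShift] at *
    omega
  · omega
  · omega
  · omega

theorem pvValNonneg_man (a : Int × Int) (h : 0 ≤ bfVal a) : 0 ≤ a.1 := by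
  have h2 : (0:Int) < 2 ^ a.2.toNat := by positivity
  simp only [bfVal] at h
  nlinarith

theorem pvManNonneg_val (a : Int × Int) (h : 0 ≤ a.1) : 0 ≤ bfVal a := by
  have h2 : (0:Int) < 2 ^ a.2.toNat := by positivity
  simp only [bfVal]
  positivity

theorem pvManNeg_val (a : Int × Int) (h : a.1 < 0) : bfVal a < 0 := by
  have h2 : (0:Int) < 2 ^ a.2.toNat := by positivity
  simp only [bfVal]
  exact mul_neg_of_neg_of_pos h h2

theorem pvLoop_exp (p : Int) (ru : Bool) (hp : 2 ≤ p) :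
    ∀ (y : Nat) (x z : Int × Int), 0 ≤ x.2 → 0 ≤ z.2 → 0 ≤ (pvBFpowLoop p ru x z y).2 := by
  intro y
  induction y using Nat.strong_induction_on with
  | _ y ih =>
    intro x z hx hz
    rw [pvBFpowLoop]
    simp only []
    by_cases h0 : y = 0
    · rw [if_pos h0]; exact hz
    · rw [if_neg h0]
      have hz' : 0 ≤ (if y % 2 = 1 then pvBFmul z x p ru else z).2 := by
        split_ifs
        · exact pvMul_exp z x p ru hp hz hx
        · exact hz
      exact ih (y / 2) (by omega) _ _ (pvMul_exp x x p ru hp hx hx) hz'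

theorem pvLoop_lo (p : Int) (hp : 2 ≤ p) :
    ∀ (y : Nat) (x z : Int × Int) (X Z : Int), 0 ≤ x.2 → 0 ≤ z.2 →
      0 ≤ bfVal x → 0 ≤ bfVal z → bfVal x ≤ X → bfVal z ≤ Z →
      0 ≤ bfVal (pvBFpowLoop p false x z y) ∧ bfVal (pvBFpowLoop p false x z y) ≤ Z * X ^ y := by
  intro y
  induction y using Nat.strong_induction_on with
  | _ y ih =>
    intro x z X Z hx hz hvx hvz hX hZ
    have hX0 : 0 ≤ X := le_trans hvx hX
    have hZ0 : 0 ≤ Z := le_trans hvz hZ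
    rw [pvBFpowLoop]
    simp only []
    by_cases h0 : y = 0
    · rw [if_pos h0]; subst h0; simpa using ⟨hvz, hZ⟩
    · rw [if_neg h0]
      set x' := pvBFmul x x p false with hx'def
      have hxe' : 0 ≤ x'.2 := pvMul_exp x x p false hp hx hx
      have hxm' : 0 ≤ x'.1 := pvMul_man_nonneg x x p false (mul_self_nonneg _)
      have hvx' : 0 ≤ bfVal x' := pvManNonneg_val x' hxm'
      have hXb : bfVal x' ≤ X * X := le_trans (pvMul_le x x p hx hx) (by nlinarith)
      have hXX0 : 0 ≤ X * X := mul_nonneg hX0 hX0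
      have hsplit : ∀ z' Z', 0 ≤ z'.2 → 0 ≤ bfVal z' → bfVal z' ≤ Z' → 0 ≤ Z' →
          0 ≤ bfVal (pvBFpowLoop p false x' z' (y / 2)) ∧
            bfVal (pvBFpowLoop p false x' z' (y / 2)) ≤ Z' * (X * X) ^ (y / 2) :=
        fun z' Z' h1 h2 h3 _ => ih (y / 2) (by omega) x' z' (X * X) Z' hxe' h1 hvx' h2 hXb h3
      have hpow : (X * X) ^ (y / 2) = X ^ (2 * (y / 2)) := by
        rw [← pow_two, ← pow_mul]
      by_cases hodd : y % 2 = 1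
      · rw [if_pos hodd]
        set z' := pvBFmul z x p false with hz'def
        have hze' : 0 ≤ z'.2 := pvMul_exp z x p false hp hz hx
        have hzm' : 0 ≤ z'.1 := pvMul_man_nonneg z x p false (mul_nonneg (pvValNonneg_man z hvz) (pvValNonneg_man x hvx))
        have hvz' : 0 ≤ bfVal z' := pvManNonneg_val z' hzm'
        have hZb : bfVal z' ≤ Z * X := le_trans (pvMul_le z x p hz hx) (by nlinarith)
        obtain ⟨g1, g2⟩ := hsplit z' (Z * X) hze' hvz' hZb (mul_nonneg hZ0 hX0)
        have hyeq : y = 2 * (y / 2) + 1 := by omega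
        refine ⟨g1, le_trans g2 (le_of_eq ?_)⟩
        rw [hpow]
        conv_rhs => rw [hyeq]
        rw [pow_succ]; ring
      · rw [if_neg hodd]
        obtain ⟨g1, g2⟩ := hsplit z Z hz hvz hZ hZ0
        have hyeq : y = 2 * (y / 2) := by omega
        refine ⟨g1, le_trans g2 (le_of_eq ?_)⟩
        rw [hpow]
        conv_rhs => rw [hyeq]

theorem pvLoop_hi (p : Int) (hp : 2 ≤ p) :
    ∀ (y : Nat) (x z : Int × Int) (X Z : Int), 0 ≤ x.2 → 0 ≤ z.2 →
      0 ≤ X → 0 ≤ Z → X ≤ bfVal x → Z ≤ bfVal z →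
      Z * X ^ y ≤ bfVal (pvBFpowLoop p true x z y) := by
  intro y
  induction y using Nat.strong_induction_on with
  | _ y ih =>
    intro x z X Z hx hz hX0 hZ0 hX hZ
    rw [pvBFpowLoop]
    simp only []
    by_cases h0 : y = 0
    · rw [if_pos h0]; subst h0; simpa using hZ
    · rw [if_neg h0]
      set x' := pvBFmul x x p true with hx'def
      have hxe' : 0 ≤ x'.2 := pvMul_exp x x p true hp hx hx
      have hXb : X * X ≤ bfVal x' := le_trans (by nlinarith) (pvMul_ge x x p hp hx hx)
      have hXX0 : 0 ≤ X * X := mul_nonneg hX0 hX0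
      have hpow : (X * X) ^ (y / 2) = X ^ (2 * (y / 2)) := by
        rw [← pow_two, ← pow_mul]
      by_cases hodd : y % 2 = 1
      · rw [if_pos hodd]
        set z' := pvBFmul z x p true with hz'def
        have hze' : 0 ≤ z'.2 := pvMul_exp z x p true hp hz hx
        have hZb : Z * X ≤ bfVal z' := le_trans (by nlinarith) (pvMul_ge z x p hp hz hx)
        have g2 := ih (y / 2) (by omega) x' z' (X * X) (Z * X) hxe' hze' hXX0 (mul_nonneg hZ0 hX0) hXb hZb
        have hyeq : y = 2 * (y / 2) + 1 := by omega
        refine le_trans (le_of_eq ?_) g2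
        rw [hpow]
        conv_lhs => rw [hyeq]
        rw [pow_succ]; ring
      · rw [if_neg hodd]
        have g2 := ih (y / 2) (by omega) x' z (X * X) Z hxe' hz hXX0 hZ0 hXb hZ
        have hyeq : y = 2 * (y / 2) := by omega
        refine le_trans (le_of_eq ?_) g2
        rw [hpow]
        conv_lhs => rw [hyeq]

theorem pvLoop_sign (p : Int) (ru : Bool) (hp : 2 ≤ p) :
    ∀ (y : Nat) (x z : Int × Int), 0 < x.1 → z.1 < 0 → (pvBFpowLoop p ru x z y).1 < 0 := by
  intro y
  induction y using Nat.strong_induction_on with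
  | _ y ih =>
    intro x z hx hz
    rw [pvBFpowLoop]
    simp only []
    by_cases h0 : y = 0
    · rw [if_pos h0]; exact hz
    · rw [if_neg h0]
      have hx' : 0 < (pvBFmul x x p ru).1 := pvMul_man_pos x x p ru (by omega) (mul_pos hx hx)
      have hz' : (if y % 2 = 1 then pvBFmul z x p ru else z).1 < 0 := by
        split_ifs
        · exact pvMul_man_neg z x p ru hp (mul_neg_of_neg_of_pos hz hx)
        · exact hz
      exact ih (y / 2) (by omega) _ _ hx' hz'

theorem pvPow_exp (m e p : Int) (ru : Bool) (hp : 2 ≤ p) : 0 ≤ (pvBFpow m e p ru).2 :=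
  pvLoop_exp p ru hp e.toNat (m, 0) (1, 0) le_rfl le_rfl

theorem pvPow_lo (m e p : Int) (hp : 2 ≤ p) (hv : 0 ≤ m ^ e.toNat) :
    0 ≤ bfVal (pvBFpow m e p false) ∧ bfVal (pvBFpow m e p false) ≤ m ^ e.toNat := by
  unfold pvBFpow
  rcases le_or_gt 0 m with hm | hm
  · have h := pvLoop_lo p hp e.toNat (m, 0) (1, 0) m 1 le_rfl le_rfl
      (by simp [bfVal]; omega) (by simp [bfVal]) (by simp [bfVal]) (by simp [bfVal])
    simpa using h
  · set n := e.toNat with hn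
    have heven : n % 2 = 0 := by
      rcases Nat.even_or_odd n with h | h
      · exact Nat.even_iff.mp h
      · exact absurd hv (by simpa using Odd.pow_neg h hm)
    by_cases hn0 : n = 0
    · rw [pvBFpowLoop, if_pos hn0, hn0]
      simp [bfVal]
    · rw [pvBFpowLoop]
      simp only []
      rw [if_neg hn0, if_neg (by omega : ¬ n % 2 = 1)]
      have hsq : bfVal (pvBFmul (m, 0) (m, 0) p false) ≤ m * m :=
        le_trans (pvMul_le (m, 0) (m, 0) p le_rfl le_rfl) (by simp [bfVal])
      have hsqn : 0 ≤ bfVal (pvBFmul (m, 0) (m, 0) p false) :=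
        pvManNonneg_val _ (pvMul_man_nonneg (m, 0) (m, 0) p false (mul_self_nonneg m))
      have h := pvLoop_lo p hp (n / 2) (pvBFmul (m, 0) (m, 0) p false) (1, 0) (m * m) 1
        (pvMul_exp (m, 0) (m, 0) p false hp le_rfl le_rfl) le_rfl hsqn (by simp [bfVal]) hsq
        (by simp [bfVal])
      have hpow : (m * m) ^ (n / 2) = m ^ n := by
        rw [← pow_two, ← pow_mul]
        congr 1
        omega
      rw [hpow] at h
      simpa using h

theorem pvPow_hi (m e p : Int) (hp : 2 ≤ p) (hv : 0 ≤ m ^ e.toNat) :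
    m ^ e.toNat ≤ bfVal (pvBFpow m e p true) := by
  unfold pvBFpow
  rcases le_or_gt 0 m with hm | hm
  · have h := pvLoop_hi p hp e.toNat (m, 0) (1, 0) m 1 le_rfl le_rfl hm (by norm_num)
      (by simp [bfVal]) (by simp [bfVal])
    simpa using h
  · set n := e.toNat with hn
    have heven : n % 2 = 0 := by
      rcases Nat.even_or_odd n with h | h
      · exact Nat.even_iff.mp h
      · exact absurd hv (by simpa using Odd.pow_neg h hm)
    by_cases hn0 : n = 0
    · rw [pvBFpowLoop, if_pos hn0, hn0]
      simp [bfVal]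
    · rw [pvBFpowLoop]
      simp only []
      rw [if_neg hn0, if_neg (by omega : ¬ n % 2 = 1)]
      have hsq : m * m ≤ bfVal (pvBFmul (m, 0) (m, 0) p true) :=
        le_trans (by simp [bfVal]) (pvMul_ge (m, 0) (m, 0) p hp le_rfl le_rfl)
      have h := pvLoop_hi p hp (n / 2) (pvBFmul (m, 0) (m, 0) p true) (1, 0) (m * m) 1
        (pvMul_exp (m, 0) (m, 0) p true hp le_rfl le_rfl) le_rfl (mul_self_nonneg m) (by norm_num) hsq
        (by simp [bfVal])
      have hpow : (m * m) ^ (n / 2) = m ^ n := by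
        rw [← pow_two, ← pow_mul]
        congr 1
        omega
      rw [hpow] at h
      simpa using h

theorem pvPow_neg (m e p : Int) (ru : Bool) (hp : 2 ≤ p) (hm : m < 0) (he : Odd e.toNat) :
    (pvBFpow m e p ru).1 < 0 := by
  unfold pvBFpow
  have hodd : e.toNat % 2 = 1 := Nat.odd_iff.mp he
  rw [pvBFpowLoop]
  simp only []
  rw [if_neg (by omega : ¬ e.toNat = 0), if_pos hodd]
  apply pvLoop_sign p ru hp
  · exact pvMul_man_pos (m, 0) (m, 0) p ru (by omega) (mul_pos_of_neg_of_neg hm hm)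
  · exact pvMul_man_neg (1, 0) (m, 0) p ru hp (by simpa using hm)

theorem pvCmp_eq (a b : Int × Int) (ha : 0 ≤ a.2) (hb : 0 ≤ b.2) :
    pvBFcmp a b = if bfVal a < bfVal b then -1 else if bfVal b < bfVal a then 1 else 0 := by
  unfold pvBFcmp
  simp only []
  rw [Int.shiftLeft_eq, Int.shiftLeft_eq]
  set minE := min a.2 b.2 with hminE
  have hmin0 : 0 ≤ minE := by omega
  have hkey : ∀ c : Int × Int, 0 ≤ c.2 → minE ≤ c.2 →
      c.1 * 2 ^ (c.2 - minE).toNat * 2 ^ minE.toNat = bfVal c := by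
    intro c hc hle
    rw [mul_assoc, ← pow_add]
    have : (c.2 - minE).toNat + minE.toNat = c.2.toNat := by omega
    rw [this, bfVal]
  have hpos : (0:Int) < 2 ^ minE.toNat := by positivity
  have h1 : a.1 * 2 ^ (a.2 - minE).toNat < b.1 * 2 ^ (b.2 - minE).toNat ↔ bfVal a < bfVal b := by
    rw [← Int.mul_lt_mul_right hpos, hkey a ha (by omega), hkey b hb (by omega)]
  have h2 : b.1 * 2 ^ (b.2 - minE).toNat < a.1 * 2 ^ (a.2 - minE).toNat ↔ bfVal b < bfVal a := by
    rw [← Int.mul_lt_mul_right hpos, hkey a ha (by omega), hkey b hb (by omega)]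
  rw [if_congr h1 rfl (if_congr h2 rfl rfl)]

theorem pvCmp_lt (a b : Int × Int) (ha : 0 ≤ a.2) (hb : 0 ≤ b.2) :
    pvBFcmp a b < 0 ↔ bfVal a < bfVal b := by
  rw [pvCmp_eq a b ha hb]
  split_ifs with h1 h2 <;> simp <;> omega

theorem pvCmp_gt (a b : Int × Int) (ha : 0 ≤ a.2) (hb : 0 ≤ b.2) :
    0 < pvBFcmp a b ↔ bfVal b < bfVal a := by
  rw [pvCmp_eq a b ha hb]
  split_ifs with h1 h2 <;> simp <;> omega

theorem pvPowSign_nonneg (m : Int) (n : Nat) (h : ¬(m < 0 ∧ Odd n)) : 0 ≤ m ^ n := by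
  rcases lt_or_ge m 0 with hm | hm
  · rcases Nat.even_or_odd n with h' | h'
    · exact h'.pow_nonneg m
    · exact absurd ⟨hm, h'⟩ h
  · exact pow_nonneg hm n

theorem pvMain (pairx pairy : Int × Int) (hpre : Pre_compare_powers pairx pairy) :
    ∀ p : Int, 2 ≤ p → pvCPloop pairx pairy p = pvExactCmp pairx pairy := by
  obtain ⟨hex, hey, hnb⟩ := hpre
  set VX := pairx.1 ^ pairx.2.toNat with hVX
  set VY := pairy.1 ^ pairy.2.toNat with hVY
  have halt : pvExactCmp pairx pairy
      = (if VX > VY then 1 else 0) - (if VX < VY then 1 else 0) := by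
    unfold pvExactCmp
    rfl
  suffices H : ∀ k : Nat, ∀ p : Int, (1025 - p).toNat ≤ k → 2 ≤ p →
      pvCPloop pairx pairy p = pvExactCmp pairx pairy by
    exact fun p hp => H (1025 - p).toNat p le_rfl hp
  intro k
  induction k with
  | zero =>
    intro p hk hp
    rw [pvCPloop, if_neg (by omega), halt]
    simp only []
    split_ifs <;> omega
  | succ k ih =>
    intro p hk hp
    rw [pvCPloop]
    simp only []
    by_cases hg : 1 ≤ p ∧ p ≤ 1024
    · rw [if_pos hg]
      set XL := pvBFpow pairx.1 pairx.2 p false with hXL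
      set XH := pvBFpow pairx.1 pairx.2 p true with hXH
      set YL := pvBFpow pairy.1 pairy.2 p false with hYL
      set YH := pvBFpow pairy.1 pairy.2 p true with hYH
      have eXL : 0 ≤ XL.2 := pvPow_exp _ _ _ _ hp
      have eXH : 0 ≤ XH.2 := pvPow_exp _ _ _ _ hp
      have eYL : 0 ≤ YL.2 := pvPow_exp _ _ _ _ hp
      have eYH : 0 ≤ YH.2 := pvPow_exp _ _ _ _ hp
      have hrec : ¬ pvBFcmp XH YL < 0 → ¬ 0 < pvBFcmp XL YH →
          pvCPloop pairx pairy (p * 2) = pvExactCmp pairx pairy := by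
        intro _ _
        exact ih (p * 2) (by omega) (by omega)
      by_cases hSX : pairx.1 < 0 ∧ Odd pairx.2.toNat
      · -- VX < 0; by Pre_, VY ≥ 0
        have hVXneg : VX < 0 := Odd.pow_neg hSX.2 hSX.1
        have hSYfalse : ¬(pairy.1 < 0 ∧ Odd pairy.2.toNat) := by
          intro hSY
          exact hnb ⟨hSX.1, hSY.1, by have := Nat.odd_iff.mp hSX.2; omega,
            by have := Nat.odd_iff.mp hSY.2; omega⟩
        have hVYpos : 0 ≤ VY := pvPowSign_nonneg _ _ hSYfalse
        have hXHneg : bfVal XH < 0 := pvManNeg_val _ (pvPow_neg _ _ _ _ hp hSX.1 hSX.2)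
        have hYLpos : 0 ≤ bfVal YL := (pvPow_lo _ _ _ hp hVYpos).1
        rw [if_pos ((pvCmp_lt XH YL eXH eYL).mpr (by omega))]
        rw [halt, if_neg (by omega), if_pos (by omega)]; norm_num
      · have hVXpos : 0 ≤ VX := pvPowSign_nonneg _ _ hSX
        by_cases hSY : pairy.1 < 0 ∧ Odd pairy.2.toNat
        · -- VY < 0 ≤ VX : the second interval test fires with +1
          have hVYneg : VY < 0 := Odd.pow_neg hSY.2 hSY.1
          have hYLneg : bfVal YL < 0 := pvManNeg_val _ (pvPow_neg _ _ _ _ hp hSY.1 hSY.2)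
          have hYHneg : bfVal YH < 0 := pvManNeg_val _ (pvPow_neg _ _ _ _ hp hSY.1 hSY.2)
          have hXHpos : VX ≤ bfVal XH := pvPow_hi _ _ _ hp hVXpos
          have hXLpos : 0 ≤ bfVal XL := (pvPow_lo _ _ _ hp hVXpos).1
          rw [if_neg (by rw [pvCmp_lt XH YL eXH eYL]; omega)]
          rw [if_pos ((pvCmp_gt XL YH eXL eYH).mpr (by omega))]
          rw [halt, if_pos (by omega), if_neg (by omega)]; norm_num
        · -- both values nonnegative: intervals are sound
          have hVYpos : 0 ≤ VY := pvPowSign_nonneg _ _ hSY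
          obtain ⟨hXL0, hXLle⟩ := pvPow_lo pairx.1 pairx.2 p hp hVXpos
          obtain ⟨hYL0, hYLle⟩ := pvPow_lo pairy.1 pairy.2 p hp hVYpos
          rw [← hXL] at hXL0 hXLle
          rw [← hYL] at hYL0 hYLle
          have hXHge : VX ≤ bfVal XH := pvPow_hi _ _ _ hp hVXpos
          have hYHge : VY ≤ bfVal YH := pvPow_hi _ _ _ hp hVYpos
          by_cases h1 : bfVal XH < bfVal YL
          · rw [if_pos ((pvCmp_lt XH YL eXH eYL).mpr h1)]
            rw [halt, if_neg (by omega), if_pos (by omega)]; norm_num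
          · rw [if_neg (by rw [pvCmp_lt XH YL eXH eYL]; omega)]
            by_cases h2 : bfVal YH < bfVal XL
            · rw [if_pos ((pvCmp_gt XL YH eXL eYH).mpr h2)]
              rw [halt, if_pos (by omega), if_neg (by omega)]; norm_num
            · rw [if_neg (by rw [pvCmp_gt XL YH eXL eYH]; omega)]
              exact hrec (by rw [pvCmp_lt XH YL eXH eYL]; omega)
                (by rw [pvCmp_gt XL YH eXL eYH]; omega)
    · rw [if_neg hg, halt]
      split_ifs <;> omega

-- ----- B-side correctness: compare_powers_alt computes the exact comparison -----

-- the binary search never goes below its lower end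
theorem pvIrootLoop_ge : ∀ (k : Nat) (a e lo hi : Int), (hi - lo).toNat ≤ k →
    lo ≤ pvIrootLoop a e lo hi := by
  intro k
  induction k with
  | zero =>
    intro a e lo hi hk
    rw [pvIrootLoop, if_neg (by omega)]
  | succ k ih =>
    intro a e lo hi hk
    rw [pvIrootLoop]
    by_cases h : lo < hi
    · rw [if_pos h]
      simp only []
      split_ifs with hle
      · exact le_trans (by omega) (ih a e ((lo + hi + 1) / 2) hi (by omega))
      · exact ih a e lo ((lo + hi + 1) / 2 - 1) (by omega)
    · rw [if_neg h]

theorem pvIroot_ge_one (n s : Int) : 1 ≤ pvIroot n s :=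
  pvIrootLoop_ge (n - 1).toNat n s 1 n (by omega)

theorem pvReduceLoop_sound (n e : Int) (hn : 2 ≤ n) (he : 1 ≤ e) :
    ∀ s : Nat, 2 ≤ (pvReduceLoop n e s).1 ∧ 1 ≤ (pvReduceLoop n e s).2 ∧
      (pvReduceLoop n e s).1 ^ (pvReduceLoop n e s).2.toNat = n ^ e.toNat := by
  intro s
  induction s using Nat.strong_induction_on with
  | _ s ih =>
    rw [pvReduceLoop]
    simp only []
    by_cases h0 : s < 2
    · rw [if_pos h0]
      exact ⟨hn, he, rfl⟩
    · rw [if_neg h0]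
      by_cases hc : pvIroot n (s : Int) ^ s = n
      · rw [if_pos hc]
        set w := pvIroot n (s : Int) with hwdef
        have hw1 : 1 ≤ w := pvIroot_ge_one n (s : Int)
        have hw2 : 2 ≤ w := by
          rcases eq_or_lt_of_le hw1 with h | h
          · exfalso
            rw [← h, one_pow] at hc
            omega
          · omega
        have hs2 : (2:Int) ≤ (s : Int) := by exact_mod_cast (by omega : 2 ≤ s)
        refine ⟨hw2, by nlinarith, ?_⟩
        have hcast : ((s : Int) * e) = ((s * e.toNat : Nat) : Int) := by
          push_cast [Int.toNat_of_nonneg (by omega : (0:Int) ≤ e)]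
          ring
        rw [hcast, Int.toNat_natCast, pow_mul, hc]
      · rw [if_neg hc]
        exact ih (s - 1) (by omega)

theorem pvReduce_sound (n e : Int) (hn : 2 ≤ n) (he : 1 ≤ e) :
    2 ≤ (pvReduce n e).1 ∧ 1 ≤ (pvReduce n e).2 ∧
      (pvReduce n e).1 ^ (pvReduce n e).2.toNat = n ^ e.toNat :=
  pvReduceLoop_sound n e hn he _

theorem pvSign_spec (base e : Int) (he : 0 ≤ e) :
    pvSign base e =
      if 0 < base ^ e.toNat then 1 else if base ^ e.toNat = 0 then 0 else -1 := by
  unfold pvSign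
  by_cases h0 : e = 0
  · rw [if_pos h0, h0]
    norm_num
  · rw [if_neg h0]
    by_cases hz : base = 0
    · rw [if_pos hz, hz, zero_pow (by omega : e.toNat ≠ 0)]
      norm_num
    · rw [if_neg hz]
      by_cases hc : 0 < base ∨ e % 2 = 0
      · rw [if_pos hc]
        have hp : 0 < base ^ e.toNat := by
          rcases hc with h | h
          · exact pow_pos h _
          · have : Even e.toNat := by rw [Nat.even_iff]; omega
            exact this.pow_pos hz
        rw [if_pos hp]
      · rw [if_neg hc]
        push_neg at hc
        have hneg : base < 0 := by omega
        have : Odd e.toNat := by rw [Nat.odd_iff]; omega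
        have hp := Odd.pow_neg this hneg
        rw [if_neg (by omega), if_neg (by omega)]

-- if the bit-length windows separate, the powers separate
theorem pvPowGap (u v : Int) (hu : 2 ≤ u) (hv : 2 ≤ v) (B D : Nat) (hD : 1 ≤ D)
    (h : ((PySem.Int.bitLength v : Int)) * D ≤ ((PySem.Int.bitLength u : Int) - 1) * B) :
    v ^ D < u ^ B := by
  obtain ⟨hlo, -⟩ := pvAbsBounds u (by omega)
  obtain ⟨-, hhi⟩ := pvAbsBounds v (by omega)
  rw [abs_of_pos (by omega : (0:Int) < u)] at hlo
  rw [abs_of_pos (by omega : (0:Int) < v)] at hhi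
  have hLu : 2 ≤ PySem.Int.bitLength u := by
    by_contra hcon
    have : (2:Int) ^ (PySem.Int.bitLength u) ≤ 2 ^ 1 := pow_le_pow_right₀ (by norm_num) (by omega)
    obtain ⟨-, hh⟩ := pvAbsBounds u (by omega)
    rw [abs_of_pos (by omega : (0:Int) < u)] at hh
    omega
  have hN : PySem.Int.bitLength v * D ≤ (PySem.Int.bitLength u - 1) * B := by
    have hcast : (((PySem.Int.bitLength u - 1) * B : Nat) : Int) = ((PySem.Int.bitLength u : Int) - 1) * B := by
      push_cast [Nat.cast_sub (by omega : 1 ≤ PySem.Int.bitLength u)]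
      ring
    have hcast2 : (((PySem.Int.bitLength v) * D : Nat) : Int) = ((PySem.Int.bitLength v : Int)) * D := by
      push_cast; ring
    have := h
    rw [← hcast, ← hcast2] at this
    exact_mod_cast this
  calc v ^ D < (2 ^ PySem.Int.bitLength v) ^ D := by
        exact pow_lt_pow_left₀ hhi (by omega) (by omega)
    _ = 2 ^ (PySem.Int.bitLength v * D) := by rw [← pow_mul]
    _ ≤ 2 ^ ((PySem.Int.bitLength u - 1) * B) := pow_le_pow_right₀ (by norm_num) hN
    _ = (2 ^ (PySem.Int.bitLength u - 1)) ^ B := by rw [← pow_mul]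
    _ ≤ u ^ B := pow_le_pow_left₀ (by positivity) hlo B

-- comparison-shape helper
theorem pvCmpShape (x y x' y' : Int) (h1 : x < y ↔ x' < y') (h2 : y < x ↔ y' < x') :
    (if x > y then (1:Int) else 0) - (if x < y then 1 else 0)
      = (if x' > y' then 1 else 0) - (if x' < y' then 1 else 0) := by
  simp only [gt_iff_lt]
  rw [if_congr h2 rfl rfl, if_congr h1 rfl rfl]

theorem pvLogLoop_spec (u v b d : Int) (hu : 2 ≤ u) (hv : 2 ≤ v) (hb : 1 ≤ b) (hd : 1 ≤ d) :
    ∀ (fuel k : Nat), 1 ≤ k →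
      pvLogLoop u v b d fuel k =
        (if u ^ b.toNat > v ^ d.toNat then 1 else 0) -
          (if u ^ b.toNat < v ^ d.toNat then 1 else 0) := by
  intro fuel
  induction fuel with
  | zero => intro k _; rfl
  | succ fuel ih =>
    intro k hk
    rw [pvLogLoop]
    simp only []
    by_cases hcap : k * (PySem.Int.bitLength u + PySem.Int.bitLength v) ≤ 10 ^ 6
    · rw [if_pos hcap]
      have hkne : k ≠ 0 := by omega
      have hu2 : 2 ≤ u ^ k := le_trans hu (le_self_pow₀ (by omega) hkne)
      have hv2 : 2 ≤ v ^ k := le_trans hv (le_self_pow₀ (by omega) hkne)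
      have hbc : ((b.toNat : Nat) : Int) = b := Int.toNat_of_nonneg (by omega)
      have hdc : ((d.toNat : Nat) : Int) = d := Int.toNat_of_nonneg (by omega)
      have hred : ∀ s t : Int, 0 ≤ s → 0 ≤ t → s ^ k < t ^ k → s < t := by
        intro s t hs ht hlt
        exact (pow_lt_pow_iff_left₀ hs ht hkne).mp hlt
      by_cases h1 : ((PySem.Int.bitLength (u ^ k) : Int) - 1) * b ≥ (PySem.Int.bitLength (v ^ k) : Int) * d
      · rw [if_pos h1]
        have hgap : (v ^ k) ^ d.toNat < (u ^ k) ^ b.toNat := by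
          refine pvPowGap (u ^ k) (v ^ k) hu2 hv2 b.toNat d.toNat (by omega) ?_
          rw [hbc, hdc]
          exact h1
        rw [← pow_mul, ← pow_mul, Nat.mul_comm k d.toNat, Nat.mul_comm k b.toNat,
          pow_mul, pow_mul] at hgap
        have := hred _ _ (pow_nonneg (by omega) _) (pow_nonneg (by omega) _) hgap
        rw [if_pos (by omega), if_neg (by omega)]
        norm_num
      · rw [if_neg h1]
        by_cases h2 : ((PySem.Int.bitLength (v ^ k) : Int) - 1) * d ≥ (PySem.Int.bitLength (u ^ k) : Int) * b
        · rw [if_pos h2]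
          have hgap : (u ^ k) ^ b.toNat < (v ^ k) ^ d.toNat := by
            refine pvPowGap (v ^ k) (u ^ k) hv2 hu2 d.toNat b.toNat (by omega) ?_
            rw [hbc, hdc]
            exact h2
          rw [← pow_mul, ← pow_mul, Nat.mul_comm k d.toNat, Nat.mul_comm k b.toNat,
            pow_mul, pow_mul] at hgap
          have := hred _ _ (pow_nonneg (by omega) _) (pow_nonneg (by omega) _) hgap
          rw [if_neg (by omega), if_pos (by omega)]
          norm_num
        · rw [if_neg h2]
          exact ih (k * 2) (by omega)
    · rw [if_neg hcap]

theorem pvCmpAbs_spec (u b v d : Int) (hb : 0 ≤ b) (hd : 0 ≤ d)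
    (hu : 1 ≤ u ∨ b = 0) (hv : 1 ≤ v ∨ d = 0) :
    pvCmpAbs u b v d =
      (if u ^ b.toNat > v ^ d.toNat then 1 else 0) -
        (if u ^ b.toNat < v ^ d.toNat then 1 else 0) := by
  unfold pvCmpAbs
  simp only []
  have hone : ∀ e f : Int, 0 ≤ f → (e = 1 ∨ f = 0) → e ^ f.toNat = 1 := by
    rintro e f _ (h | h)
    · rw [h, one_pow]
    · rw [h]; norm_num
  by_cases h1 : (u = 1 ∨ b = 0) ∧ (v = 1 ∨ d = 0)
  · rw [if_pos h1, hone u b hb h1.1, hone v d hd h1.2]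
    norm_num
  · rw [if_neg h1]
    by_cases h2 : u = 1 ∨ b = 0
    · rw [if_pos h2, hone u b hb h2]
      have hvv : 2 ≤ v := by
        have hnc : ¬(v = 1 ∨ d = 0) := fun hh => h1 ⟨h2, hh⟩
        rcases hv with h | h
        · omega
        · exact absurd (Or.inr h) hnc
      have hdn : d.toNat ≠ 0 := by
        have hnc : ¬(v = 1 ∨ d = 0) := fun hh => h1 ⟨h2, hh⟩
        omega
      have : (1:Int) < v ^ d.toNat := one_lt_pow₀ (by omega) hdn
      split_ifs <;> omega
    · rw [if_neg h2]
      have huu : 2 ≤ u := by rcases hu with h | h <;> omega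
      have hbn : 1 ≤ b := by omega
      by_cases h3 : v = 1 ∨ d = 0
      · rw [if_pos h3, hone v d hd h3]
        have : (1:Int) < u ^ b.toNat := one_lt_pow₀ (by omega) (by omega)
        split_ifs <;> omega
      · rw [if_neg h3]
        have hvv : 2 ≤ v := by rcases hv with h | h <;> omega
        have hdn : 1 ≤ d := by omega
        obtain ⟨hw1, he1, heq1⟩ := pvReduce_sound u b huu hbn
        obtain ⟨hw2, he2, heq2⟩ := pvReduce_sound v d hvv hdn
        rw [← heq1, ← heq2]
        by_cases huv : (pvReduce u b).1 = (pvReduce v d).1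
        · rw [if_pos huv, huv]
          refine pvCmpShape _ _ _ _ ?_ ?_
          · rw [pow_lt_pow_iff_right₀ (by omega : (1:Int) < (pvReduce v d).1)]
            omega
          · rw [pow_lt_pow_iff_right₀ (by omega : (1:Int) < (pvReduce v d).1)]
            omega
        · rw [if_neg huv]
          exact pvLogLoop_spec (pvReduce u b).1 (pvReduce v d).1 (pvReduce u b).2
            (pvReduce v d).2 hw1 hw2 he1 he2 21 1 le_rfl

set_option maxHeartbeats 1000000 in
theorem pvAltCorrect (pairx pairy : Int × Int) (hex : 0 ≤ pairx.2) (hey : 0 ≤ pairy.2) :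
    compare_powers_alt pairx pairy = pvExactCmp pairx pairy := by
  unfold compare_powers_alt pvExactCmp
  simp only []
  rw [if_neg (by omega)]
  set x := pairx.1 ^ pairx.2.toNat with hx
  set y := pairy.1 ^ pairy.2.toNat with hy
  have hsx := pvSign_spec pairx.1 pairx.2 hex
  have hsy := pvSign_spec pairy.1 pairy.2 hey
  rw [← hx] at hsx
  rw [← hy] at hsy
  rw [hsx, hsy]
  have haxne : x ≠ 0 → (pairx.1 ≠ 0 ∨ pairx.2 = 0) := by
    intro hxne
    by_cases he : pairx.2 = 0
    · exact Or.inr he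
    · refine Or.inl fun h0 => hxne ?_
      rw [hx, h0, zero_pow (by omega : pairx.2.toNat ≠ 0)]
  have hayne : y ≠ 0 → (pairy.1 ≠ 0 ∨ pairy.2 = 0) := by
    intro hyne
    by_cases he : pairy.2 = 0
    · exact Or.inr he
    · refine Or.inl fun h0 => hyne ?_
      rw [hy, h0, zero_pow (by omega : pairy.2.toNat ≠ 0)]
  have hmag : ∀ (hax : pairx.1 ≠ 0 ∨ pairx.2 = 0) (hay : pairy.1 ≠ 0 ∨ pairy.2 = 0),
      pvCmpAbs |pairx.1| pairx.2 |pairy.1| pairy.2 =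
        (if |x| > |y| then 1 else 0) - (if |x| < |y| then 1 else 0) := by
    intro hax hay
    have h1 : 1 ≤ |pairx.1| ∨ pairx.2 = 0 := by
      rcases hax with h | h
      · exact Or.inl (Int.one_le_abs (by omega))
      · exact Or.inr h
    have h2 : 1 ≤ |pairy.1| ∨ pairy.2 = 0 := by
      rcases hay with h | h
      · exact Or.inl (Int.one_le_abs (by omega))
      · exact Or.inr h
    rw [pvCmpAbs_spec |pairx.1| pairx.2 |pairy.1| pairy.2 hex hey h1 h2,
      ← abs_pow, ← abs_pow, ← hx, ← hy]
  rcases lt_trichotomy x 0 with hx0 | hx0 | hx0 <;>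
    rcases lt_trichotomy y 0 with hy0 | hy0 | hy0
  · -- x < 0, y < 0
    rw [if_neg (by omega : ¬ 0 < x), if_neg (by omega : ¬ x = 0),
      if_neg (by omega : ¬ 0 < y), if_neg (by omega : ¬ y = 0)]
    norm_num
    rw [hmag (haxne (by omega)) (hayne (by omega)),
      abs_of_neg (show x < 0 by omega), abs_of_neg (show y < 0 by omega)]
    split_ifs <;> omega
  · -- x < 0, y = 0
    rw [if_neg (by omega : ¬ 0 < x), if_neg (by omega : ¬ x = 0),
      if_neg (by omega : ¬ 0 < y), if_pos hy0]
    norm_num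
    split_ifs <;> omega
  · -- x < 0, y > 0
    rw [if_neg (by omega : ¬ 0 < x), if_neg (by omega : ¬ x = 0), if_pos hy0]
    norm_num
    split_ifs <;> omega
  · -- x = 0, y < 0
    rw [if_neg (by omega : ¬ 0 < x), if_pos hx0,
      if_neg (by omega : ¬ 0 < y), if_neg (by omega : ¬ y = 0)]
    norm_num
    split_ifs <;> omega
  · -- x = 0, y = 0
    rw [if_neg (by omega : ¬ 0 < x), if_pos hx0,
      if_neg (by omega : ¬ 0 < y), if_pos hy0]
    norm_num
    split_ifs <;> omega
  · -- x = 0, y > 0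
    rw [if_neg (by omega : ¬ 0 < x), if_pos hx0, if_pos hy0]
    norm_num
    split_ifs <;> omega
  · -- x > 0, y < 0
    rw [if_pos hx0, if_neg (by omega : ¬ 0 < y), if_neg (by omega : ¬ y = 0)]
    norm_num
    split_ifs <;> omega
  · -- x > 0, y = 0
    rw [if_pos hx0, if_neg (by omega : ¬ 0 < y), if_pos hy0]
    norm_num
    split_ifs <;> omega
  · -- x > 0, y > 0
    rw [if_pos hx0, if_pos hy0]
    norm_num
    rw [hmag (haxne (by omega)) (hayne (by omega)),
      abs_of_pos (show 0 < x by omega), abs_of_pos (show 0 < y by omega)]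

-- ===== VERDICT (by name: the statement is the Claim_ definition above) =====
theorem compare_powers_spec : Claim_equal_compare_powers := by
  intro pairx pairy _hdom hpre
  unfold Spec_compare_powers
  rw [show compare_powers pairx pairy = pvCPloop pairx pairy 16 from rfl,
    pvMain pairx pairy hpre 16 (by norm_num),
    pvAltCorrect pairx pairy hpre.1 hpre.2.1]
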